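-- pv_equiv track=rewrite | github.com/peppermintpatty5/advent2021 | src/08.py | part1
-- ===== SOURCE A (Python) =====
-- def part1(input_txt: str) -> int:
--     left_sides = []
--     right_sides = []
--     for line in input_txt.splitlines():
--         a, b = line.split(" | ")
--         left_sides.append(a.split())
--         right_sides.append(b.split())
--
--     return sum(sum(1 for x in item if len(x) in (2, 3, 4, 7)) for item in right_sides)
-- ===== SOURCE B (Python) =====
-- def part1(input_txt: str) -> int:
--     total = 0
--     for line in input_txt.splitlines():
--         _, right = line.split(" | ")
--         run = 0
--         for c in right + " ":
--             if c.isspace():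
--                 if run in (2, 3, 4, 7):
--                     total += 1
--                 run = 0
--             else:
--                 run += 1
--     return total
-- ===== Notes on version B (the rewrite author's own statement) =====
-- stated objective: alternative
-- what changed: B replaces A's two-phase split()-tokenization (materialize left_sides/right_sides token lists, then a nested generator sum) with a single character-level run-length state machine: it scans the right side of each line once, tracking the length of the current run of non-space characters and bumping a running total whenever a run of length 2, 3, 4 or 7 ends, so no token lists are ever built; the 2-tuple unpack of the line's split on ' | ' is kept, so malformed lines raise the same ValueError.
import Mathlib
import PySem

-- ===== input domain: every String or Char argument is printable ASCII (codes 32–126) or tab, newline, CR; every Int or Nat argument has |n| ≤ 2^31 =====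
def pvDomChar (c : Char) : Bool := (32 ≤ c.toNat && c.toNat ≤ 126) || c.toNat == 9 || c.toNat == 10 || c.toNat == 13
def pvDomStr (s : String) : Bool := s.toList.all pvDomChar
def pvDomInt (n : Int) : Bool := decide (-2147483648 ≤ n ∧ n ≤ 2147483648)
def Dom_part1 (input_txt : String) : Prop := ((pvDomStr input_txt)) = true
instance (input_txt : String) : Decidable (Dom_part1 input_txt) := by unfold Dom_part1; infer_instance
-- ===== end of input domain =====

-- B replaces split()-tokenization of the right side by a character-level run-length
-- state machine (one scan, no token lists); the 2-tuple unpack of the line's split on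
-- " | " is kept, so malformed lines raise the same ValueError (excluded by Pre_).

-- ===== PORT A =====
-- len(x) in (2, 3, 4, 7)
def pvLen2347 (x : String) : Bool :=
  PySem.Str.len x == 2 || PySem.Str.len x == 3 || PySem.Str.len x == 4 || PySem.Str.len x == 7

def part1 (input_txt : String) : Int :=
  -- the left_sides/right_sides loop; the `a, b` unpack of the line's split is ported
  -- totally via pyGet?/getD — Pre_part1 excludes the lines on which the Python raises
  let sides := (PySem.Str.splitlines input_txt).foldl
    (fun acc line =>
      (acc.1 ++ [PySem.Str.split₀ ((PySem.List.pyGet? ((PySem.Str.split? line " | ").getD []) 0).getD "")],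
       acc.2 ++ [PySem.Str.split₀ ((PySem.List.pyGet? ((PySem.Str.split? line " | ").getD []) 1).getD "")]))
    (([], []) : List (List String) × List (List String))
  -- sum(sum(1 for x in item if len(x) in (2, 3, 4, 7)) for item in right_sides)
  (sides.2.map (fun item =>
    item.foldl (fun s x => if pvLen2347 x then s + 1 else s) (0 : Int))).sum

-- ===== PORT B =====
-- one step of B's inner character scan: state = (total, current run of non-space chars)
def pvStep (st : Int × Int) (c : Char) : Int × Int :=
  if PySem.Chars.isspace c then
    (if st.2 = 2 ∨ st.2 = 3 ∨ st.2 = 4 ∨ st.2 = 7 then st.1 + 1 else st.1, 0)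
  else (st.1, st.2 + 1)

def part1_alt (input_txt : String) : Int :=
  (PySem.Str.splitlines input_txt).foldl
    (fun total line =>
      -- the `_, right` unpack: on a line whose split is not a pair Python B raises
      -- ValueError (outside Pre_part1); the port keeps the total unchanged there
      match (PySem.Str.split? line " | ").getD [] with
      | [_, right] =>
        -- for c in right + " ": run-length scan, the trailing space flushes the last run
        ((right.toList ++ [' ']).foldl pvStep (total, 0)).1
      | _ => total) 0

-- ===== PRECONDITION & SPEC =====
-- Pre_ excludes exactly the inputs on which both Pythons raise ValueError: a line whose
-- split on the separator does not have exactly two parts makes the 2-tuple unpack fail.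
def Pre_part1 (input_txt : String) : Prop :=
  ∀ line ∈ PySem.Str.splitlines input_txt, ((PySem.Str.split? line " | ").getD []).length = 2
instance (input_txt : String) : Decidable (Pre_part1 input_txt) := by unfold Pre_part1; infer_instance
def pvWitness_part1 : String := "ab | cd efg"

def Spec_part1 (input_txt : String) (out : Int) : Prop := out = part1_alt input_txt
instance (input_txt : String) (out : Int) : Decidable (Spec_part1 input_txt out) := by unfold Spec_part1; infer_instance

-- ===== CLAIM (what is proved, stated in full; the proofs are below) =====
def Claim_equal_part1 : Prop := ∀ (input_txt : String), Dom_part1 input_txt → Pre_part1 input_txt → Spec_part1 input_txt (part1 input_txt)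

-- ===== LEMMAS AND PROOFS =====

-- the run-length predicate on a token length
def pvRun (n : Nat) : Bool := n == 2 || n == 3 || n == 4 || n == 7

theorem pv_go_nil (cur : List Char) (acc : List (List Char)) :
    PySem.Chars.split₀.go [] cur acc
      = acc.reverse ++ (if cur = [] then [] else [cur.reverse]) := by
  simp only [PySem.Chars.split₀.go]
  split_ifs <;> simp_all [List.isEmpty_iff]

theorem pv_go_cons (c : Char) (cs cur : List Char) (acc : List (List Char)) :
    PySem.Chars.split₀.go (c :: cs) cur acc =
      if PySem.Chars.isspace c then
        (if cur = [] then PySem.Chars.split₀.go cs [] acc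
         else PySem.Chars.split₀.go cs [] (cur.reverse :: acc))
      else PySem.Chars.split₀.go cs (c :: cur) acc := by
  simp [PySem.Chars.split₀.go]

theorem pv_go_acc (cs : List Char) (cur : List Char) (acc : List (List Char)) :
    PySem.Chars.split₀.go cs cur acc = acc.reverse ++ PySem.Chars.split₀.go cs cur [] := by
  induction cs generalizing cur acc with
  | nil => simp [pv_go_nil]
  | cons c cs ih =>
    rw [pv_go_cons, pv_go_cons]
    by_cases h : PySem.Chars.isspace c = true
    · rw [if_pos h, if_pos h]
      by_cases hc : cur = []
      · rw [if_pos hc, if_pos hc, ih [] acc]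
      · rw [if_neg hc, if_neg hc, ih [] (cur.reverse :: acc), ih [] (cur.reverse :: [])]
        simp
    · rw [if_neg h, if_neg h]
      exact ih (c :: cur) acc

-- the Int test in pvStep at run = cur.length is pvRun cur.length
theorem pv_run_cast (n : Nat) :
    ((n : Int) = 2 ∨ (n : Int) = 3 ∨ (n : Int) = 4 ∨ (n : Int) = 7) ↔ pvRun n = true := by
  unfold pvRun
  simp only [Bool.or_eq_true, beq_iff_eq]
  omega

-- B's inner scan computes the number of split() tokens whose length is 2/3/4/7
theorem pv_scan (cs : List Char) (cur : List Char) (t : Int) :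
    ((cs ++ [' ']).foldl pvStep (t, (cur.length : Int))).1
      = t + ((PySem.Chars.split₀.go cs cur []).countP (fun w => pvRun w.length)) := by
  induction cs generalizing cur t with
  | nil =>
    simp only [List.nil_append, List.foldl_cons, List.foldl_nil, pv_go_nil, List.reverse_nil,
      List.nil_append]
    have hsp : PySem.Chars.isspace ' ' = true := by decide
    unfold pvStep
    rw [if_pos hsp]
    by_cases hc : cur = []
    · subst hc; simp [pvRun]
    · rw [if_neg hc]
      simp only [List.countP_cons, List.countP_nil, List.length_reverse]
      by_cases hp : pvRun cur.length = true
      · rw [if_pos ((pv_run_cast cur.length).mpr hp)]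
        simp [hp]
      · rw [if_neg (fun h => hp ((pv_run_cast cur.length).mp h))]
        simp [Bool.eq_false_iff.mpr hp]
  | cons c cs ih =>
    simp only [List.cons_append, List.foldl_cons]
    rw [pv_go_cons]
    by_cases h : PySem.Chars.isspace c = true
    · rw [if_pos h]
      by_cases hc : cur = []
      · subst hc
        have hstep : pvStep (t, ((([] : List Char).length : Nat) : Int)) c
            = (t, ((([] : List Char).length : Nat) : Int)) := by
          unfold pvStep
          rw [if_pos h]
          simp
        rw [if_pos rfl, hstep, ih [] t]
      · rw [if_neg hc]
        have hstep : pvStep (t, (cur.length : Int)) c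
            = ((if pvRun cur.length then t + 1 else t : Int), ((([] : List Char).length : Nat) : Int)) := by
          unfold pvStep
          rw [if_pos h]
          by_cases hp : pvRun cur.length = true
          · rw [if_pos ((pv_run_cast cur.length).mpr hp)]; simp [hp]
          · rw [if_neg (fun hh => hp ((pv_run_cast cur.length).mp hh))]
            simp [Bool.eq_false_iff.mpr hp]
        rw [hstep, ih [] _, pv_go_acc cs [] (cur.reverse :: [])]
        simp only [List.reverse_cons, List.reverse_nil, List.nil_append, List.countP_append,
          List.countP_cons, List.countP_nil, List.length_reverse]
        by_cases hp : pvRun cur.length = true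
        · simp only [hp, if_true]
          push_cast
          ring
        · simp [Bool.eq_false_iff.mpr hp]
    · rw [if_neg h]
      have hstep : pvStep (t, (cur.length : Int)) c = (t, (((c :: cur).length : Nat) : Int)) := by
        unfold pvStep
        rw [if_neg h]
        push_cast
        simp
      rw [hstep]
      exact ih (c :: cur) t

-- A's per-line token predicate agrees with pvRun on the raw char tokens
theorem pv_pred_ofList (w : List Char) :
    pvLen2347 (String.ofList w) = pvRun w.length := by
  unfold pvLen2347 pvRun
  rw [Bool.eq_iff_iff]
  simp only [Bool.or_eq_true, beq_iff_eq, PySem.Str.len_eq]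
  simp
  omega

-- on a line admitted by Pre_, B's step adds exactly A's per-line count (parts = [a, b])
theorem pv_line_step (count : Int) (line : String)
    (h2 : ((PySem.Str.split? line " | ").getD []).length = 2) :
    (match (PySem.Str.split? line " | ").getD [] with
      | [_, right] => ((right.toList ++ [' ']).foldl pvStep (count, 0)).1
      | _ => count)
    = count + (PySem.Str.split₀
        ((PySem.List.pyGet? ((PySem.Str.split? line " | ").getD []) 1).getD "")).foldl
        (fun s x => if pvLen2347 x then s + 1 else s) (0 : Int) := by
  obtain ⟨a, b, hab⟩ : ∃ a b, (PySem.Str.split? line " | ").getD [] = [a, b] := by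
    match h : (PySem.Str.split? line " | ").getD [], h2 with
    | [a, b], _ => exact ⟨a, b, rfl⟩
  rw [hab]
  show ((b.toList ++ [' ']).foldl pvStep (count, 0)).1
      = count + (PySem.Str.split₀ ((PySem.List.pyGet? ([a, b] : List String) 1).getD "")).foldl
          (fun s x => if pvLen2347 x then s + 1 else s) (0 : Int)
  have hb : (PySem.List.pyGet? ([a, b] : List String) 1).getD "" = b := rfl
  rw [hb, PySem.List.foldl_count_if]
  have h0 : ((count, 0) : Int × Int) = (count, ((([] : List Char).length : Nat) : Int)) := rfl
  rw [h0, pv_scan b.toList [] count]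
  have hsplit : PySem.Str.split₀ b = (PySem.Chars.split₀ b.toList).map String.ofList := rfl
  have hgo : PySem.Chars.split₀ b.toList = PySem.Chars.split₀.go b.toList [] [] := rfl
  rw [hsplit, List.countP_map, hgo]
  have hpred : (pvLen2347 ∘ String.ofList) = (fun w : List Char => pvRun w.length) := by
    funext w
    exact pv_pred_ofList w
  rw [hpred]
  ring

theorem part1_spec : Claim_equal_part1 := by
  intro s _ hpre
  unfold Spec_part1
  simp only [part1, part1_alt]
  rw [PySem.List.foldl_prod_mk
    (fun acc line => acc ++ [PySem.Str.split₀ ((PySem.List.pyGet? ((PySem.Str.split? line " | ").getD []) 0).getD "")])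
    (fun acc line => acc ++ [PySem.Str.split₀ ((PySem.List.pyGet? ((PySem.Str.split? line " | ").getD []) 1).getD "")])]
  dsimp only
  rw [PySem.List.foldl_append_singleton_eq_map
    (fun line => PySem.Str.split₀ ((PySem.List.pyGet? ((PySem.Str.split? line " | ").getD []) 1).getD ""))
    (PySem.Str.splitlines s) []]
  rw [PySem.List.foldl_congr_mem (PySem.Str.splitlines s) _
    (fun count line =>
      count + (PySem.Str.split₀
        ((PySem.List.pyGet? ((PySem.Str.split? line " | ").getD []) 1).getD "")).foldl
        (fun s x => if pvLen2347 x then s + 1 else s) (0 : Int))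
    0
    (fun acc line hline => pv_line_step acc line (hpre line hline))]
  rw [PySem.List.foldl_add (PySem.Str.splitlines s)
    (fun line => (PySem.Str.split₀
      ((PySem.List.pyGet? ((PySem.Str.split? line " | ").getD []) 1).getD "")).foldl
      (fun s x => if pvLen2347 x then s + 1 else s) (0 : Int)) 0]
  simp [List.map_map, Function.comp_def]
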